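-- pv_equiv track=rewrite | github.com/carsonak/bigint_calc | tests/str_to_num_array.py | numstr_to_numarray
-- ===== SOURCE A (Python) =====
-- from collections.abc import Iterable
--
-- def numstr_to_numarray(input_strings: Iterable[str]) -> str:
--     """Return the repr of a list of ints from a string of decimals."""
--     output: str = ""
--     for numstr in input_strings:
--         numstr = numstr.strip()
--         if not numstr or not numstr[0].isdigit() and len(numstr) < 2:
--             output = "".join([output, numstr, "\n"])
--             continue
--
--         str_i: int = len(numstr)
--         prev: int = str_i
--         num_list: list[int] = []
--         while str_i > 0:
--             str_i = 0 if str_i - 9 < 0 else str_i - 9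
--             section: str = numstr[str_i:prev]
--             if section == "-" and len(numstr) > 1:
--                 num_list[-1] *= -1
--             else:
--                 num_list.append(int(section))
--
--             prev = str_i
--
--         output = "".join([output, str(num_list), "\n"])
--
--     return output.strip()
-- ===== SOURCE B (Python) =====
-- def numstr_to_numarray(input_strings):
--     """Return the repr of a list of ints from a string of decimals."""
--     lines = []
--     for s in input_strings:
--         t = s.strip()
--         if not t or not t[0].isdigit() and len(t) < 2:
--             lines.append(t)
--             continue
--         rem = len(t) % 9 or 9
--         groups = [t[:rem]] + [t[i:i + 9] for i in range(rem, len(t), 9)]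
--         if groups[0] == "-" and len(t) > 1:
--             big_endian = [-int(groups[1])] + [int(g) for g in groups[2:]]
--         else:
--             big_endian = [int(g) for g in groups]
--         lines.append(repr(big_endian[::-1]))
--     return "\n".join(lines).strip()
-- ===== Notes on version B (the rewrite author's own statement) =====
-- stated objective: alternative
-- what changed: B slices each number front-to-back into big-endian groups (front remainder of len%9-or-9 chars, then consecutive 9-char slices built from a range) and reverses once, and assembles the output with a single '\n'.join over per-line results, instead of A's backwards index-stepping while-loop with mutable str_i/prev state and repeated string re-concatenation of the whole output.
-- outside the precondition, e.g. on numstr_to_numarray(['1_000']): A returns '[1000]', B returns '[1000]'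
import Mathlib
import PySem

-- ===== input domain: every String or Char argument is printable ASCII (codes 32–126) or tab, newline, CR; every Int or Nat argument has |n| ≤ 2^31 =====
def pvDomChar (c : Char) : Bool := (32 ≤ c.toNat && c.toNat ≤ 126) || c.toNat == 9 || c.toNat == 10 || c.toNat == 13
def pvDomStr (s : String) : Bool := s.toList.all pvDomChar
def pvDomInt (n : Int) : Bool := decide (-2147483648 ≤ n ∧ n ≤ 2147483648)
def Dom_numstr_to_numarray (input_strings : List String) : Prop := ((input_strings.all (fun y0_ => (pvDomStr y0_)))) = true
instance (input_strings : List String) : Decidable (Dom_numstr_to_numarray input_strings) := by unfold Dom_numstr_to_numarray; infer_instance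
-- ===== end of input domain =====

-- B rebuilds each chunked line front-to-back (front remainder group, then 9-char slices, reversed once)
-- instead of A's backwards index-stepping while-loop; objective: alternative decomposition, same cost.

-- shared helper: Python's str()/repr() of a list of ints, e.g. "[1, -2]" (both programs call this builtin)
def pyReprIntList (xs : List Int) : String :=
  PySem.Str.join "" ["[", PySem.Str.join ", " (xs.map PySem.Int.toStr), "]"]

-- shared helper: the guard 'not numstr or not numstr[0].isdigit() and len(numstr) < 2'
-- (identical source text in A and B; short-circuit on the empty string kept via getD false)
def pyIsPassThrough (t : String) : Bool :=
  decide (t = "") ||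
    (!(((PySem.Str.pyGet? t 0).map PySem.Chars.isdigit).getD false) && decide (PySem.Str.len t < 2))

-- ===== PORT A =====
-- the while-loop: state (str_i, prev, num_list); 'int(section)' is PySem.Int.ofStr?,
-- its ValueError cases are excluded by Pre_ (we take .getD 0 there, outside any claim)
def aChunkLoop (numstr : String) (strI prev : Int) (numList : List Int) : List Int :=
  if _h : strI > 0 then
    let strI' := if strI - 9 < 0 then 0 else strI - 9
    let sec := PySem.Str.slice numstr (some strI') (some prev)
    let numList' :=
      if sec = "-" ∧ PySem.Str.len numstr > 1 then
        numList.dropLast ++ [PySem.List.pyGetD numList (-1) 0 * (-1)]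
      else
        numList ++ [(PySem.Int.ofStr? sec).getD 0]
    aChunkLoop numstr strI' strI' numList'
  else numList
termination_by strI.toNat
decreasing_by split <;> omega

def numstr_to_numarray (input_strings : List String) : String :=
  let output := input_strings.foldl (fun output numstr0 =>
    let numstr := PySem.Str.strip numstr0
    if pyIsPassThrough numstr then
      PySem.Str.join "" [output, numstr, "\n"]
    else
      let numList := aChunkLoop numstr (PySem.Str.len numstr) (PySem.Str.len numstr) []
      PySem.Str.join "" [output, pyReprIntList numList, "\n"]) ""
  PySem.Str.strip output

-- ===== PORT B =====
-- one chunked line: rem = len % 9 or 9; big-endian groups t[:rem], t[rem:rem+9], …; reversed at the end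
def bChunkLine (t : String) : String :=
  let n := PySem.Str.len t
  let rem := if PySem.Int.mod n 9 = 0 then 9 else PySem.Int.mod n 9
  let groups := PySem.Str.slice t none (some rem) ::
    (PySem.List.pyRange rem n 9).map (fun i => PySem.Str.slice t (some i) (some (i + 9)))
  let bigEndian :=
    if PySem.List.pyGetD groups 0 "" = "-" ∧ n > 1 then
      (-((PySem.Int.ofStr? (PySem.List.pyGetD groups 1 "")).getD 0)) ::
        (PySem.List.slice groups (some 2) none).map (fun g => (PySem.Int.ofStr? g).getD 0)
    else
      groups.map (fun g => (PySem.Int.ofStr? g).getD 0)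
  pyReprIntList bigEndian.reverse

def numstr_to_numarray_alt (input_strings : List String) : String :=
  let lines := input_strings.map (fun s =>
    let t := PySem.Str.strip s
    if pyIsPassThrough t then t else bChunkLine t)
  PySem.Str.strip (PySem.Str.join "\n" lines)

-- ===== PRECONDITION & SPEC =====
-- Pre_ admits each string whose stripped form is a passthrough (empty, or a single non-digit) or an
-- optional sign followed by digits only ('+' only when its 9-chunking does not isolate a bare '+').
-- This excludes exactly the inputs where int() raises on some 9-char section (ValueError), and also
-- underscore-separated numbers like '1_000', on which A's acceptance is an accident of where the
-- chunk boundaries fall ('1_000' is accepted but '1_234567890' raises).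
def preStr (s : String) : Bool :=
  let t := PySem.Chars.strip s.toList
  match t with
  | [] => true
  | c :: rest =>
    if !PySem.Chars.isdigit c && decide (t.length < 2) then true
    else
      rest.all PySem.Chars.isdigit &&
        (PySem.Chars.isdigit c || c == '-' || (c == '+' && t.length % 9 != 1))

def Pre_numstr_to_numarray (input_strings : List String) : Prop :=
  input_strings.all preStr = true

instance (input_strings : List String) : Decidable (Pre_numstr_to_numarray input_strings) := by
  unfold Pre_numstr_to_numarray; infer_instance

def pvWitness_numstr_to_numarray : List String := ["-1234567890", " 42 ", "x", "", "+123456789012"]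

def Spec_numstr_to_numarray (input_strings : List String) (out : String) : Prop := out = numstr_to_numarray_alt input_strings
instance (input_strings : List String) (out : String) : Decidable (Spec_numstr_to_numarray input_strings out) := by unfold Spec_numstr_to_numarray; infer_instance

-- ===== CLAIM (what is proved, stated in full; the proofs are below) =====
def Claim_equal_numstr_to_numarray : Prop := ∀ (input_strings : List String), Dom_numstr_to_numarray input_strings → Pre_numstr_to_numarray input_strings → Spec_numstr_to_numarray input_strings (numstr_to_numarray input_strings)

-- ===== LEMMAS AND PROOFS =====

theorem join3_toList (a b c : String) :
    (PySem.Str.join "" [a, b, c]).toList = a.toList ++ b.toList ++ c.toList := by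
  rw [PySem.Str.toList_join]
  have h0 : "".toList = [] := by decide
  simp [h0, PySem.Chars.join, List.intercalate]

-- the int value of the 9-char slice of t starting at i
def gval (t : String) (i : Nat) : Int :=
  (PySem.Int.ofStr? (PySem.Str.slice t (some (i : Int)) (some ((i : Int) + 9)))).getD 0

-- A's while-loop, unrolled over the m full 9-char sections above position r
theorem aLoop_steps (t : String) (r m : Nat) (hr : 1 ≤ r)
    (hle : r + 9 * m ≤ t.toList.length) (acc : List Int) :
    aChunkLoop t ((r : Int) + 9 * (m : Int)) ((r : Int) + 9 * (m : Int)) acc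
      = aChunkLoop t r r (acc ++ ((List.range m).map (fun k => gval t (r + 9 * k))).reverse) := by
  induction m generalizing acc with
  | zero => simp
  | succ m ih =>
    rw [aChunkLoop, dif_pos (by push_cast; omega)]
    have hs : (if (r : Int) + 9 * ((m:Nat)+1 : Nat) - 9 < 0 then (0:Int) else (r:Int) + 9 * ((m:Nat)+1 : Nat) - 9)
        = (r : Int) + 9 * (m : Int) := by
      split <;> (push_cast at *) <;> omega
    simp only [hs]
    -- section ≠ "-"
    have hsec : PySem.Str.slice t (some ((r : Int) + 9 * (m:Int))) (some ((r : Int) + 9 * (((m:Nat)+1 : Nat) : Int))) ≠ "-" := by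
      intro heq
      have h1 := congrArg String.toList heq
      rw [PySem.Str.toList_slice, PySem.Chars.slice_eq_listSlice] at h1
      have c1 : ((r : Int) + 9 * (m:Int)) = ((r + 9*m : Nat) : Int) := by push_cast; ring
      have c2 : ((r : Int) + 9 * (((m:Nat)+1 : Nat) : Int)) = ((r + 9*m + 9 : Nat) : Int) := by push_cast; ring
      rw [c1, c2, PySem.List.slice_natCast] at h1
      have h2 := congrArg List.length h1
      simp at h2
      have hlen : t.toList.length = t.length := by simp
      omega
    rw [if_neg (by exact fun hc => hsec hc.1)]
    rw [ih (by push_cast at *; omega)]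
    have hv : (PySem.Int.ofStr? (PySem.Str.slice t (some ((r : Int) + 9 * (m:Int))) (some ((r : Int) + 9 * (((m:Nat)+1 : Nat) : Int))))).getD 0
        = gval t (r + 9 * m) := by
      unfold gval
      have c1 : ((r + 9*m : Nat) : Int) = (r : Int) + 9 * (m:Int) := by push_cast; ring
      have c3 : (r : Int) + 9 * (((m:Nat)+1 : Nat) : Int) = (r:Int) + 9*(m:Int) + 9 := by push_cast; ring
      rw [c1, c3]
    rw [hv]
    exact congrArg (aChunkLoop t (r:Int) (r:Int)) (by simp [List.range_succ])

-- A's final iteration: section is t[0:r]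
theorem aLoop_last (t : String) (r : Nat) (hr : 1 ≤ r) (hr9 : r ≤ 9) (acc : List Int) :
    aChunkLoop t (r : Int) (r : Int) acc
      = (if PySem.Str.slice t (some 0) (some (r : Int)) = "-" ∧ PySem.Str.len t > 1 then
          acc.dropLast ++ [PySem.List.pyGetD acc (-1) 0 * (-1)]
        else acc ++ [(PySem.Int.ofStr? (PySem.Str.slice t (some 0) (some (r : Int)))).getD 0]) := by
  rw [aChunkLoop]
  have hpos : (r : Int) > 0 := by exact_mod_cast hr
  rw [dif_pos hpos]
  have hs : (if (r : Int) - 9 < 0 then (0:Int) else (r:Int) - 9) = 0 := by split <;> omega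
  simp only [hs]
  rw [aChunkLoop, dif_neg (by omega : ¬ (0:Int) > 0)]

-- per-line equality on the chunking branch
theorem chunk_line_eq (t : String) (ht : t.toList ≠ []) :
    pyReprIntList (aChunkLoop t (PySem.Str.len t) (PySem.Str.len t) []) = bChunkLine t := by
  have hn1 : 1 ≤ t.toList.length := List.length_pos_iff.mpr ht
  set n := t.toList.length with hn
  set r := if n % 9 = 0 then 9 else n % 9 with hrdef
  have hr1 : 1 ≤ r := by rw [hrdef]; split <;> omega
  have hr9 : r ≤ 9 := by rw [hrdef]; split <;> omega
  have hrn : r ≤ n := by rw [hrdef]; split <;> omega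
  obtain ⟨m, hm⟩ : ∃ m, n = r + 9 * m := ⟨(n - r) / 9, by rw [hrdef]; split <;> omega⟩
  have hlen : PySem.Str.len t = (n : Int) := by simp [PySem.Str.len_eq, hn]
  have hmod : PySem.Int.mod (n : Int) 9 = ((n % 9 : Nat) : Int) := by
    unfold PySem.Int.mod; rw [Int.fmod_eq_emod]; simp
  have hrem : (if PySem.Int.mod ((n : Nat) : Int) 9 = 0 then (9:Int) else PySem.Int.mod ((n : Nat) : Int) 9) = (r : Int) := by
    rw [hmod, hrdef]; split_ifs <;> omega
  have hrange : PySem.List.pyRange (r : Int) (n : Int) 9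
      = List.map (fun k : Nat => (r : Int) + 9 * (k : Int)) (List.range m) := by
    rw [PySem.List.pyRange_of_pos (r:Int) (n:Int) (by norm_num : (0:Int) < 9)]
    have hcnt : (if (r : Int) < (n : Int) then (((n:Int) - (r:Int) + 9 - 1) / 9).toNat else 0) = m := by
      split <;> omega
    rw [hcnt]
  -- A side
  have hcast : ((n : Nat) : Int) = (r : Int) + 9 * (m : Int) := by omega
  rw [hlen, hcast, aLoop_steps t r m hr1 (by omega) [], aLoop_last t r hr1 hr9, List.nil_append]
  -- B side
  unfold bChunkLine
  simp only [hlen, hrem, hrange, List.map_map]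
  have hfront : PySem.Str.slice t (some 0) (some (r:Int)) = PySem.Str.slice t none (some (r:Int)) := by
    apply String.ext
    rw [PySem.Str.toList_slice, PySem.Str.toList_slice, PySem.Chars.slice_eq_listSlice,
      PySem.Chars.slice_eq_listSlice, PySem.List.slice_zero_start]
  have hS : List.map (fun k : Nat => gval t (r + 9*k)) (List.range m)
      = (List.map ((fun i => PySem.Str.slice t (some i) (some (i + 9))) ∘ fun k : Nat => (r:Int) + 9*(k:Int)) (List.range m)).map
          (fun g => (PySem.Int.ofStr? g).getD 0) := by
    rw [List.map_map]
    apply List.map_congr_left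
    intro k _
    unfold gval
    simp only [Function.comp_apply]
    have e1 : ((r + 9*k : Nat) : Int) = (r:Int) + 9*(k:Int) := by push_cast; ring
    rw [e1]
  rw [hfront, hS]
  set S := List.map ((fun i => PySem.Str.slice t (some i) (some (i + 9))) ∘ fun k : Nat => (r:Int) + 9*(k:Int)) (List.range m) with hSdef
  set g0 := PySem.Str.slice t none (some (r:Int)) with hg0def
  rw [PySem.List.pyGetD_zero_cons]
  by_cases hneg : g0 = "-" ∧ ((n:Nat) : Int) > 1
  · rw [if_pos hneg, if_pos hneg]
    -- r = 1
    have hg0l : g0.toList = t.toList.take r := by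
      rw [hg0def, PySem.Str.toList_slice, PySem.Chars.slice_eq_listSlice, PySem.List.slice_to_natCast]
    have hrone : r = 1 := by
      have h1 : t.toList.take r = ['-'] := by
        have h0 := congrArg String.toList hneg.1
        rw [hg0l] at h0
        rw [h0]; decide
      have h2 := congrArg List.length h1
      simp only [List.length_take, List.length_cons, List.length_nil] at h2
      omega
    have hm1 : 1 ≤ m := by
      have : (1:Int) < (n:Nat) := hneg.2
      omega
    obtain ⟨m', rfl⟩ : ∃ m', m = m' + 1 := ⟨m - 1, by omega⟩
    -- unfold first element of S
    rw [hSdef, List.range_succ_eq_map, List.map_cons, List.map_cons]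
    simp only [Function.comp_apply]
    set s0 := PySem.Str.slice t (some ((r:Int) + 9*((0:Nat):Int))) (some ((r:Int) + 9*((0:Nat):Int) + 9)) with hs0def
    set rest := List.map ((fun i => PySem.Str.slice t (some i) (some (i + 9))) ∘ fun k : Nat => (r:Int) + 9*(k:Int)) (List.map Nat.succ (List.range m')) with hrestdef
    rw [PySem.List.slice_from (g0 :: s0 :: rest) (by norm_num : (0:Int) ≤ 2)]
    have hdrop : List.drop ((2:Int).toNat) (g0 :: s0 :: rest) = rest := rfl
    rw [hdrop]
    have hget1 : PySem.List.pyGetD (g0 :: s0 :: rest) 1 "" = s0 := by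
      simp [PySem.List.pyGetD, PySem.List.pyGet?, PySem.List.pyIdx?]
    rw [hget1]
    refine congrArg pyReprIntList ?_
    simp only [List.reverse_cons, List.dropLast_concat,
      PySem.List.pyGetD_neg_one_append_singleton]
    ring_nf
  · rw [if_neg hneg, if_neg hneg]
    refine congrArg pyReprIntList ?_
    simp

-- line produced for one input string (identical for both programs)
def lineChars (s : String) : List Char :=
  (let t := PySem.Str.strip s
   if pyIsPassThrough t then t else bChunkLine t).toList

theorem foldA (l : List String) (acc : String) :
    (l.foldl (fun output numstr0 =>
      let numstr := PySem.Str.strip numstr0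
      if pyIsPassThrough numstr then
        PySem.Str.join "" [output, numstr, "\n"]
      else
        let numList := aChunkLoop numstr (PySem.Str.len numstr) (PySem.Str.len numstr) []
        PySem.Str.join "" [output, pyReprIntList numList, "\n"]) acc).toList
      = acc.toList ++ (l.map (fun s => lineChars s ++ ['\n'])).flatten := by
  induction l generalizing acc with
  | nil => simp
  | cons s l ih =>
    simp only [List.foldl_cons, List.map_cons, List.flatten_cons]
    by_cases hp : pyIsPassThrough (PySem.Str.strip s) = true
    · simp only [hp, if_true]
      rw [ih, join3_toList]
      simp [lineChars, hp]
    · simp only [hp, if_false, Bool.false_eq_true]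
      rw [ih, join3_toList]
      have hne : (PySem.Str.strip s).toList ≠ [] := by
        intro h0
        have : PySem.Str.strip s = "" := String.ext (by simpa using h0)
        apply hp
        simp [pyIsPassThrough, this]
      rw [chunk_line_eq _ hne]
      simp [lineChars, hp]

theorem isspace_nl : PySem.Chars.isspace '\n' = true := by decide

theorem rstrip_append_nl (x : List Char) :
    PySem.Chars.rstrip (x ++ ['\n']) = PySem.Chars.rstrip x := by
  simp [PySem.Chars.rstrip, isspace_nl]

theorem strip_append_nl (x : List Char) :
    PySem.Chars.strip (x ++ ['\n']) = PySem.Chars.strip x := by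
  unfold PySem.Chars.strip PySem.Chars.lstrip
  rw [List.dropWhile_append]
  split
  · next h =>
    have h' : List.dropWhile PySem.Chars.isspace x = [] := by
      simpa [List.isEmpty_iff] using h
    simp [h', PySem.Chars.rstrip, List.dropWhile, isspace_nl]
  · rw [rstrip_append_nl]

theorem flatten_nl (L : List (List Char)) :
    (L.map (· ++ ['\n'])).flatten
      = (['\n'].intercalate L) ++ (if L.isEmpty then [] else ['\n']) := by
  induction L with
  | nil => simp [List.intercalate]
  | cons x L ih =>
    cases L with
    | nil => simp [List.intercalate]
    | cons y L' =>
      simp only [List.map_cons, List.flatten_cons] at *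
      rw [ih]
      have : List.intercalate ['\n'] (x :: y :: L') = x ++ ['\n'] ++ List.intercalate ['\n'] (y :: L') := by
        simp [List.intercalate, List.intersperse]
      rw [this]
      simp

theorem strip_flatten_nl (L : List (List Char)) :
    PySem.Chars.strip ((L.map (· ++ ['\n'])).flatten)
      = PySem.Chars.strip (['\n'].intercalate L) := by
  rw [flatten_nl]
  cases L with
  | nil => simp
  | cons x L' => simpa using strip_append_nl (List.intercalate ['\n'] (x :: L'))

theorem main_eq (l : List String) : numstr_to_numarray l = numstr_to_numarray_alt l := by
  apply String.ext
  show (PySem.Str.strip _).toList = (PySem.Str.strip _).toList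
  rw [PySem.Str.toList_strip, PySem.Str.toList_strip, foldA, PySem.Str.toList_join]
  have h0 : "".toList = [] := by decide
  have h2 : "\n".toList = ['\n'] := by decide
  have h1 : (l.map (fun s => lineChars s ++ ['\n'])) = (l.map lineChars).map (· ++ ['\n']) := by
    simp [List.map_map]
  rw [h0, List.nil_append, h1, strip_flatten_nl]
  simp only [PySem.Chars.join, List.map_map, h2]
  rfl

-- ===== VERDICT (by name: the statement is the Claim_ definition above) =====
theorem numstr_to_numarray_spec : Claim_equal_numstr_to_numarray := by
  intro l _ _
  show _ = _
  exact main_eq l
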